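-- pv_equiv track=rewrite | github.com/miliar/Code_Jam_Webscraper | solutions_python/Problem_148/70.py | solve
-- ===== SOURCE A (Python) =====
-- def solve(X, S):
-- 	complete_discs = 0
-- 	discs = []
-- 	S.sort()
-- 	S.reverse()
-- 	for size in S:
-- 		discs.sort()
-- 		stored = False
-- 		for i, d in enumerate(discs):
-- 			if d + size <= X:
-- 				discs.pop(i)
-- 				complete_discs += 1
-- 				stored = True
-- 				break
-- 		if not stored:
-- 			discs.append(size)
-- 	return complete_discs + len(discs)
-- ===== SOURCE B (Python) =====
-- def solve(X, S):
--     pairs = 0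
--     stack = []
--     for size in sorted(S, reverse=True):
--         if stack and stack[-1] + size <= X:
--             stack.pop()
--             pairs += 1
--         else:
--             stack.append(size)
--     return pairs + len(stack)
-- ===== Notes on version B (the rewrite author's own statement) =====
-- stated objective: faster
-- what changed: B replaces A's per-element re-sort of the stored list plus inner first-fit scan with a single pass over the descending-sorted sizes that keeps unpaired disks on a stack whose top is always the smallest stored disk, so each step is O(1) after one initial sort.
import Mathlib
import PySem

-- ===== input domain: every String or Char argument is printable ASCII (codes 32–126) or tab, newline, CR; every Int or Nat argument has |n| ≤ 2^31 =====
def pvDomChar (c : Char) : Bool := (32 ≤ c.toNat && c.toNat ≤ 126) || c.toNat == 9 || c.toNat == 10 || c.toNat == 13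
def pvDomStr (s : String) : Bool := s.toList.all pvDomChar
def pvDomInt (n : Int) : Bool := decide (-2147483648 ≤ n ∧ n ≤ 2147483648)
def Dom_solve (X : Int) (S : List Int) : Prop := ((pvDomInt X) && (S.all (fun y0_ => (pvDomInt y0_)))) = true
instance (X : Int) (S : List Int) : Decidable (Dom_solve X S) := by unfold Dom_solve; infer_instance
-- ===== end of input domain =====

-- B replaces A's per-element re-sort + inner first-fit scan with a single pass over the
-- descending-sorted sizes keeping unpaired disks on a stack (top = smallest): measurably faster.
-- Equivalence is about the RETURN value only: Python A sorts its argument S in place; B does not mutate S.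

-- ===== PORT A =====
-- inner loop: 'for i, d in enumerate(discs): if d + size <= X: discs.pop(i); break'
-- returns the list with the first fitting element removed, or none if no element fits
def findFit (X size : Int) : List Int → Option (List Int)
  | [] => none
  | d :: rest =>
      if d + size ≤ X then some rest
      else (findFit X size rest).map (d :: ·)

-- one iteration of A's outer loop, state = (complete_discs, discs)
def stepA (X : Int) (st : Int × List Int) (size : Int) : Int × List Int :=
  let ds := PySem.List.sorted st.2 (fun x => x) false
  match findFit X size ds with
  | some ds' => (st.1 + 1, ds')
  | none => (st.1, ds ++ [size])

def solve (X : Int) (S : List Int) : Int :=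
  let s := (PySem.List.sorted S (fun x => x) false).reverse  -- S.sort(); S.reverse()
  let r := s.foldl (stepA X) (0, [])
  r.1 + (r.2.length : Int)

-- ===== PORT B =====
-- one iteration of B's loop, state = (pairs, stack); stack[-1] = getLast?, pop = dropLast
def stepB (X : Int) (st : Int × List Int) (size : Int) : Int × List Int :=
  match st.2.getLast? with
  | some t => if t + size ≤ X then (st.1 + 1, st.2.dropLast) else (st.1, st.2 ++ [size])
  | none => (st.1, st.2 ++ [size])

def solve_alt (X : Int) (S : List Int) : Int :=
  let s := PySem.List.sorted S (fun x => x) true  -- sorted(S, reverse=True)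
  let r := s.foldl (stepB X) (0, [])
  r.1 + (r.2.length : Int)

-- ===== PRECONDITION & SPEC =====
def Spec_solve (X : Int) (S : List Int) (out : Int) : Prop := out = solve_alt X S
instance (X : Int) (S : List Int) (out : Int) : Decidable (Spec_solve X S out) := by unfold Spec_solve; infer_instance

-- ===== CLAIM (what is proved, stated in full; the proofs are below) =====
def Claim_equal_solve : Prop := ∀ (X : Int) (S : List Int), Dom_solve X S → Spec_solve X S (solve X S)

-- ===== LEMMAS AND PROOFS =====

-- if no element of ds fits, A's inner scan finds nothing
lemma findFit_none (X size : Int) (ds : List Int) (h : ∀ d ∈ ds, ¬ d + size ≤ X) :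
    findFit X size ds = none := by
  induction ds with
  | nil => rfl
  | cons d rest ih =>
      simp only [findFit, if_neg (h d (by simp))]
      rw [ih (fun e he => h e (by simp [he]))]
      rfl

-- sorted(S, reverse=True) = reverse of ascending sort, for integer values
lemma sortedRev_eq (S : List Int) :
    PySem.List.sorted S (fun x => x) true = (PySem.List.sorted S (fun x => x) false).reverse := by
  apply PySem.List.eq_of_perm_of_pairwise_le_of_injective (key := fun x : Int => -x)
    neg_injective
  · exact (PySem.List.sorted_perm S _ true).trans
      ((List.reverse_perm _).trans (PySem.List.sorted_perm S _ false)).symm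
  · exact (PySem.List.sorted_pairwise_rev S (fun x : Int => x)).imp (by intro a b h; simpa using h)
  · rw [List.pairwise_reverse]
    exact (PySem.List.sorted_pairwise S (fun x : Int => x)).imp (by intro a b h; simpa using h)

-- main bisimulation: over a descending list, with sorted(discs_A) = stack_B.reverse and all
-- stored disks ≥ all upcoming sizes, both folds yield the same count + length
lemma main_inv (X : Int) : ∀ (l : List Int) (c : Int) (dA stB : List Int),
    l.Pairwise (fun a b => b ≤ a) →
    PySem.List.sorted dA (fun x => x) false = stB.reverse →
    (∀ d ∈ dA, ∀ s ∈ l, s ≤ d) →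
    (l.foldl (stepA X) (c, dA)).1 + ((l.foldl (stepA X) (c, dA)).2.length : Int)
      = (l.foldl (stepB X) (c, stB)).1 + ((l.foldl (stepB X) (c, stB)).2.length : Int) := by
  intro l
  induction l with
  | nil =>
      intro c dA stB _ hsort _
      simp only [List.foldl_nil]
      have : dA.length = stB.length := by
        have h1 := PySem.List.length_sorted dA (fun x : Int => x) false
        rw [hsort] at h1
        simpa using h1.symm
      simp [this]
  | cons size l' ih =>
      intro c dA stB hdesc hsort hbd
      have hpw : (stB.reverse).Pairwise (fun a b : Int => a ≤ b) := by
        rw [← hsort]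
        exact PySem.List.sorted_pairwise dA (fun x : Int => x)
      have hmem : ∀ d, d ∈ stB.reverse → d ∈ dA := by
        intro d hd
        rw [← hsort] at hd
        exact (PySem.List.mem_sorted dA _ false d).1 hd
      have hdesc' := (List.pairwise_cons.1 hdesc).2
      have hsizebd := (List.pairwise_cons.1 hdesc).1
      simp only [List.foldl_cons]
      rcases hrev : stB.reverse with _ | ⟨t, rtail⟩
      · -- stack empty ⇒ discs empty
        have hstB : stB = [] := by simpa using congrArg List.reverse hrev
        have hdA : dA = [] := by
          rw [hrev] at hsort
          exact (PySem.List.sorted_eq_nil_iff dA _ false).1 hsort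
        subst hstB hdA
        have hA : stepA X (c, []) size = (c, [size]) := by
          simp [stepA, PySem.List.sorted, findFit]
        have hB : stepB X (c, []) size = (c, [size]) := by
          simp [stepB]
        rw [hA, hB]
        refine ih c [size] [size] hdesc' ?_ ?_
        · simp [PySem.List.sorted_eq_self_of_pairwise]
        · intro d hd s hs
          simp at hd; subst hd
          exact hsizebd s hs
      · -- stack nonempty: stB = rtail.reverse ++ [t], top t = head of sorted discs
        have hstB : stB = rtail.reverse ++ [t] := by
          have := congrArg List.reverse hrev
          simpa using this
        have hlast : stB.getLast? = some t := by rw [hstB]; simp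
        have hdrop : stB.dropLast = rtail.reverse := by rw [hstB]; simp
        have hds : PySem.List.sorted dA (fun x => x) false = t :: rtail := by rw [hsort, hrev]
        have hpw' : (t :: rtail).Pairwise (fun a b : Int => a ≤ b) := by rw [← hrev]; exact hpw
        by_cases hfit : t + size ≤ X
        · -- pair with the smallest stored disk
          have hA : stepA X (c, dA) size = (c + 1, rtail) := by
            simp only [stepA, hds, findFit, if_pos hfit]
          have hB : stepB X (c, stB) size = (c + 1, stB.dropLast) := by
            simp only [stepB, hlast, if_pos hfit]
          rw [hA, hB, hdrop]
          refine ih (c + 1) rtail rtail.reverse hdesc' ?_ ?_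
          · rw [List.reverse_reverse]
            exact PySem.List.sorted_eq_self_of_pairwise rtail (fun x => x) (List.pairwise_cons.1 hpw').2
          · intro d hd s hs
            have : d ∈ dA := hmem d (by rw [hrev]; simp [hd])
            exact hbd d this s (by simp [hs])
        · -- nothing fits (t is minimal), store size
          have hnone : findFit X size (t :: rtail) = none := by
            apply findFit_none
            intro d hd
            rcases List.mem_cons.1 hd with h | h
            · subst h; exact hfit
            · have : t ≤ d := (List.pairwise_cons.1 hpw').1 d h
              omega
          have hA : stepA X (c, dA) size = (c, (t :: rtail) ++ [size]) := by
            simp only [stepA, hds, hnone]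
          have hB : stepB X (c, stB) size = (c, stB ++ [size]) := by
            simp only [stepB, hlast, if_neg hfit]
          rw [hA, hB]
          have hsizele : ∀ d ∈ (t :: rtail), size ≤ d := by
            intro d hd
            exact hbd d (hmem d (by rw [hrev]; exact hd)) size (by simp)
          refine ih c ((t :: rtail) ++ [size]) (stB ++ [size]) hdesc' ?_ ?_
          · -- sorted(ds ++ [size]) = size :: ds  since size ≤ every stored disk
            have hperm : (size :: (t :: rtail)).Perm ((t :: rtail) ++ [size]) := by
              simpa using (List.perm_append_singleton size (t :: rtail)).symm
            have hpw2 : (size :: (t :: rtail)).Pairwise (fun a b : Int => a ≤ b) :=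
              List.pairwise_cons.2 ⟨hsizele, hpw'⟩
            have := PySem.List.sorted_id_eq_of_perm_of_pairwise _ _ hperm hpw2
            rw [this]
            simp [hstB]
          · intro d hd s hs
            rcases List.mem_append.1 hd with h | h
            · exact hbd d (hmem d (by rw [hrev]; exact h)) s (by simp [hs])
            · simp at h; subst h
              exact hsizebd s hs

-- ===== VERDICT (by name: the statement is the Claim_ definition above) =====
theorem solve_spec : Claim_equal_solve := by
  intro X S _
  unfold Spec_solve solve solve_alt
  rw [sortedRev_eq]
  exact main_inv X _ 0 [] []
    (by rw [List.pairwise_reverse]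
        exact (PySem.List.sorted_pairwise S (fun x : Int => x)).imp
          (by intro a b h; simpa using h))
    (by simp [PySem.List.sorted])
    (by intro d hd; simp at hd)
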